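-- pv_equiv track=rewrite | github.com/karolisd4/vbe-python | 2007/2007U1.py | find_most_mushrooms
-- ===== SOURCE A (Python) =====
-- def find_most_mushrooms(days: dict) -> list[int, int]:
--     # Sukuriamas masyvas su dviem skaičiais - dienos skaičius ir grybų skaičius.
--     most = [0, 0]
--
--     # Einama per žodyno elementus, randama grybų skaičių suma.
--     for key, value in days.items():
--         current_sum = sum(value)
--         # Jeigu suma didesnė už esančią masyve, ji tampa didžiausia. Diena taip pat yra išsaugoma.
--         if current_sum > most[1]:
--             most[0] = key
--             most[1] = current_sum
--         # Jeigu yra kelios dienos su vienodais grybų skaičiais, randama mažiausio skaičiaus diena.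
--         elif current_sum == most[1]:
--             most[0] = min(most[0], key)
--
--     return most     # Grąžinamas masyvas.
-- ===== SOURCE B (Python) =====
-- def find_most_mushrooms(days: dict) -> list[int, int]:
--     # Stage 1: materialise all (day, total) candidates, plus the (0, 0) seed as an ordinary candidate.
--     cands = [(k, sum(v)) for k, v in days.items()] + [(0, 0)]
--     # Stage 2: sort best-first (largest total, smallest day on ties) and take the head.
--     cands.sort(key=lambda c: (-c[1], c[0]))
--     return list(cands[0])
-- ===== Notes on version B (the rewrite author's own statement) =====
-- stated objective: alternative
-- what changed: Replaces A's single-pass running-best loop with mutable tie-break state by a staged pipeline: materialise all candidate day/sum pairs plus the zero seed pair, sort them best-first by largest sum then smallest day, and return the head.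
import Mathlib
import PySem

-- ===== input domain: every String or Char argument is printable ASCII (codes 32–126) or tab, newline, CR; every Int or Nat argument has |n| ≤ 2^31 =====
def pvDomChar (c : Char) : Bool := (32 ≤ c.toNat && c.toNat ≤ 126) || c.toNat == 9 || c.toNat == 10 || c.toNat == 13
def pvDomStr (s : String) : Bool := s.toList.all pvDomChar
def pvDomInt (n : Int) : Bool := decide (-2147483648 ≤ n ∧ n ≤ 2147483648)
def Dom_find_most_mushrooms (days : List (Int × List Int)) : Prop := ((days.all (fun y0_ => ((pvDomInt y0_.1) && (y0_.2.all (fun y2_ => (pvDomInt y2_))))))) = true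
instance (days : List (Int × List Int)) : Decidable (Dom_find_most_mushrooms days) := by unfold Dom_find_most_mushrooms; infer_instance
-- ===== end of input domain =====

-- B replaces A's single running-best loop by a staged pipeline: build all (day, total) candidates plus the (0,0) seed, sort them best-first, take the head (alternative decomposition, not faster).


-- ===== PORT A =====
-- state is the pair (most[0], most[1]); returned as the two-element list at the end
def find_most_mushrooms (days : List (Int × List Int)) : List Int :=
  let most := days.foldl (fun (most : Int × Int) kv =>
    let current_sum := kv.2.sum
    if current_sum > most.2 then (kv.1, current_sum)
    else if current_sum = most.2 then (min most.1 kv.1, most.2)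
    else most) (0, 0)
  [most.1, most.2]

-- ===== PORT B =====
-- cands[0] is ported as pyGetD with a default; the list always has the (0,0) seed, so the default is never used
def find_most_mushrooms_alt (days : List (Int × List Int)) : List Int :=
  let cands := days.map (fun kv => (kv.1, kv.2.sum)) ++ [((0 : Int), (0 : Int))]
  let sortedCands := PySem.List.sorted2 cands (fun c => -c.2) (fun c => c.1)
  let best := PySem.List.pyGetD sortedCands 0 (0, 0)
  [best.1, best.2]

-- ===== PRECONDITION & SPEC =====
def Spec_find_most_mushrooms (days : List (Int × List Int)) (out : List Int) : Prop := out = find_most_mushrooms_alt days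
instance (days : List (Int × List Int)) (out : List Int) : Decidable (Spec_find_most_mushrooms days out) := by unfold Spec_find_most_mushrooms; infer_instance

-- ===== CLAIM (what is proved, stated in full; the proofs are below) =====
def Claim_equal_find_most_mushrooms : Prop := ∀ (days : List (Int × List Int)), Dom_find_most_mushrooms days → Spec_find_most_mushrooms days (find_most_mushrooms days)

-- ===== LEMMAS AND PROOFS =====

-- the boolean comparator sorted2 uses for B's key (largest total first, then smallest day)
def bfore (a b : Int × Int) : Bool :=
  decide ((-a.2) < (-b.2)) || (!decide ((-b.2) < (-a.2)) && decide (a.1 < b.1))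

theorem bfore_iff (a b : Int × Int) :
    bfore a b = true ↔ (b.2 < a.2 ∨ (a.2 = b.2 ∧ a.1 < b.1)) := by
  simp [bfore]; omega

theorem bfore_false_iff (a b : Int × Int) :
    bfore a b = false ↔ (a.2 < b.2 ∨ (a.2 = b.2 ∧ b.1 ≤ a.1)) := by
  rw [← Bool.not_eq_true, bfore_iff]; omega

theorem bfore_trans_false {a b c : Int × Int}
    (h1 : bfore b a = false) (h2 : bfore c b = false) : bfore c a = false := by
  rw [bfore_false_iff] at *; omega

theorem bfore_antisymm {a b : Int × Int}
    (h1 : bfore a b = false) (h2 : bfore b a = false) : a = b := by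
  rw [bfore_false_iff] at *
  have : a.1 = b.1 ∧ a.2 = b.2 := by omega
  exact Prod.ext this.1 this.2

-- A's loop body picks the bfore-better of the state and the candidate (kv.1, sum kv.2)
def astep (most : Int × Int) (kv : Int × List Int) : Int × Int :=
  let current_sum := kv.2.sum
  if current_sum > most.2 then (kv.1, current_sum)
  else if current_sum = most.2 then (min most.1 kv.1, most.2)
  else most

theorem astep_mem (most : Int × Int) (kv : Int × List Int) :
    astep most kv = most ∨ astep most kv = (kv.1, kv.2.sum) := by
  unfold astep
  by_cases h1 : kv.2.sum > most.2
  · right; simp [h1]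
  · by_cases h2 : kv.2.sum = most.2
    · rcases le_total most.1 kv.1 with h3 | h3
      · left; simp [h2, min_eq_left h3]
      · right; simp [h2, min_eq_right h3]
    · left; simp [h1, h2]

theorem astep_le_state (most : Int × Int) (kv : Int × List Int) :
    bfore most (astep most kv) = false := by
  unfold astep; rw [bfore_false_iff]
  by_cases h1 : kv.2.sum > most.2
  · simp [h1]
  · by_cases h2 : kv.2.sum = most.2
    · simp [h2]
    · simp [h1, h2]

theorem astep_le_cand (most : Int × Int) (kv : Int × List Int) :
    bfore (kv.1, kv.2.sum) (astep most kv) = false := by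
  unfold astep; rw [bfore_false_iff]
  by_cases h1 : kv.2.sum > most.2
  · simp [h1]
  · by_cases h2 : kv.2.sum = most.2
    · simp [h2]
    · simp [h1, h2]; omega

-- A's fold result: it is the seed or a candidate, and it is bfore-minimal among them all
theorem afold_spec (l : List (Int × List Int)) : ∀ (acc : Int × Int),
    (l.foldl astep acc = acc ∨ ∃ kv ∈ l, l.foldl astep acc = (kv.1, kv.2.sum)) ∧
    bfore acc (l.foldl astep acc) = false ∧
    ∀ kv ∈ l, bfore (kv.1, kv.2.sum) (l.foldl astep acc) = false := by
  induction l with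
  | nil =>
    intro acc
    refine ⟨Or.inl rfl, ?_, by simp⟩
    have h0 : ([] : List (Int × List Int)).foldl astep acc = acc := rfl
    rw [h0, bfore_false_iff]; omega
  | cons kv l ih =>
    intro acc
    obtain ⟨hmem, hacc, hall⟩ := ih (astep acc kv)
    simp only [List.foldl_cons]
    refine ⟨?_, ?_, ?_⟩
    · rcases hmem with h | ⟨kv', hkv', h⟩
      · rcases astep_mem acc kv with h2 | h2
        · exact Or.inl (h.trans h2)
        · exact Or.inr ⟨kv, List.mem_cons_self, h.trans h2⟩
      · exact Or.inr ⟨kv', List.mem_cons_of_mem _ hkv', h⟩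
    · exact bfore_trans_false hacc (astep_le_state acc kv)
    · intro kv' hkv'
      rcases List.mem_cons.mp hkv' with h | h
      · rw [h]; exact bfore_trans_false hacc (astep_le_cand acc kv)
      · exact hall kv' h

-- insertBy with bfore preserves "earlier never strictly after later"
theorem insertBy_pairwise (x : Int × Int) (ys : List (Int × Int))
    (h : ys.Pairwise (fun a b => bfore b a = false)) :
    (PySem.List.insertBy bfore x ys).Pairwise (fun a b => bfore b a = false) := by
  induction ys with
  | nil => simp [PySem.List.insertBy]
  | cons y ys ih =>
    obtain ⟨hy, hys⟩ := List.pairwise_cons.mp h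
    by_cases hxy : bfore x y = true
    · simp only [PySem.List.insertBy, hxy, if_pos]
      refine List.pairwise_cons.mpr ⟨?_, h⟩
      intro z hz
      rcases List.mem_cons.mp hz with h1 | h1
      · subst h1
        rw [bfore_false_iff]; rw [bfore_iff] at hxy; omega
      · have hzy := hy z h1
        rw [bfore_false_iff] at hzy ⊢; rw [bfore_iff] at hxy; omega
    · have hxy' : bfore x y = false := by
        rw [← Bool.not_eq_true]; exact hxy
      simp only [PySem.List.insertBy, hxy, if_neg, Bool.false_eq_true, not_false_iff]
      refine List.pairwise_cons.mpr ⟨?_, ih hys⟩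
      intro z hz
      rcases (PySem.List.mem_insertBy bfore x z ys).mp hz with h1 | h1
      · subst h1; exact hxy'
      · exact hy z h1

theorem foldl_insertBy_pairwise (cs : List (Int × Int)) : ∀ (acc : List (Int × Int)),
    acc.Pairwise (fun a b => bfore b a = false) →
    (cs.foldl (fun acc x => PySem.List.insertBy bfore x acc) acc).Pairwise
      (fun a b => bfore b a = false) := by
  induction cs with
  | nil => intro acc h; exact h
  | cons c cs ih =>
    intro acc h
    exact ih _ (insertBy_pairwise c acc h)

theorem sorted2_eq_fold (cs : List (Int × Int)) :
    PySem.List.sorted2 cs (fun c => -c.2) (fun c => c.1) =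
      cs.foldl (fun acc x => PySem.List.insertBy bfore x acc) [] := rfl

-- the head of B's sorted candidate list is bfore-minimal over the candidates
theorem sorted2_head_min (cs : List (Int × Int)) (m : Int × Int) (t : List (Int × Int))
    (h : PySem.List.sorted2 cs (fun c => -c.2) (fun c => c.1) = m :: t) :
    m ∈ cs ∧ ∀ y ∈ cs, bfore y m = false := by
  have hperm := PySem.List.sorted2_perm cs (fun c => -c.2) (fun c => c.1) false
  rw [h] at hperm
  have hpw : (m :: t).Pairwise (fun a b => bfore b a = false) := by
    rw [← h, sorted2_eq_fold]
    exact foldl_insertBy_pairwise cs [] List.Pairwise.nil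
  refine ⟨hperm.mem_iff.mp (List.mem_cons_self), ?_⟩
  intro y hy
  rcases List.mem_cons.mp (hperm.mem_iff.mpr hy) with h1 | h1
  · subst h1; rw [bfore_false_iff]; omega
  · exact (List.pairwise_cons.mp hpw).1 y h1

-- ===== VERDICT (by name: the statement is the Claim_ definition above) =====
theorem find_most_mushrooms_spec : Claim_equal_find_most_mushrooms := by
  intro days _
  unfold Spec_find_most_mushrooms
  obtain ⟨hmem, hacc, hall⟩ := afold_spec days ((0 : Int), (0 : Int))
  have hne : PySem.List.sorted2 (days.map (fun kv => (kv.1, kv.2.sum)) ++ [((0 : Int), (0 : Int))])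
      (fun c => -c.2) (fun c => c.1) ≠ [] := by
    intro h0
    have hlen := (PySem.List.sorted2_perm (days.map (fun kv => (kv.1, kv.2.sum)) ++ [((0 : Int), (0 : Int))])
      (fun c => -c.2) (fun c => c.1) false).length_eq
    rw [h0] at hlen
    simp at hlen
  obtain ⟨m, t, hmt⟩ := List.exists_cons_of_ne_nil hne
  obtain ⟨hm_mem, hm_min⟩ := sorted2_head_min _ m t hmt
  have hr_mem : days.foldl astep ((0 : Int), (0 : Int)) ∈
      days.map (fun kv => (kv.1, kv.2.sum)) ++ [((0 : Int), (0 : Int))] := by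
    rcases hmem with h | ⟨kv, hkv, h⟩
    · rw [h]; simp
    · rw [h]; exact List.mem_append_left _ (List.mem_map.mpr ⟨kv, hkv, rfl⟩)
  have hr_min : ∀ y ∈ days.map (fun kv => (kv.1, kv.2.sum)) ++ [((0 : Int), (0 : Int))],
      bfore y (days.foldl astep ((0 : Int), (0 : Int))) = false := by
    intro y hy
    rcases List.mem_append.mp hy with h1 | h1
    · obtain ⟨kv, hkv, h2⟩ := List.mem_map.mp h1
      rw [← h2]; exact hall kv hkv
    · have h2 : y = ((0 : Int), (0 : Int)) := by simpa using h1
      rw [h2]; exact hacc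
  have heq : m = days.foldl astep ((0 : Int), (0 : Int)) :=
    bfore_antisymm (hr_min m hm_mem) (hm_min _ hr_mem)
  have hA : find_most_mushrooms days =
      [(days.foldl astep ((0 : Int), (0 : Int))).1, (days.foldl astep ((0 : Int), (0 : Int))).2] := rfl
  have hB : find_most_mushrooms_alt days = [m.1, m.2] := by
    unfold find_most_mushrooms_alt
    simp [hmt, PySem.List.pyGetD, PySem.List.pyGet?, PySem.List.pyIdx?]
  rw [hA, hB, heq]
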